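-- pv_equiv track=rewrite | github.com/galaxid3d/Python-Quine_MDNF | Quine_MDNF.py | make_term
-- ===== SOURCE A (Python) =====
-- def make_term(k, N, isDNF=True):  # делает терм из целого числа заданной длинны
--     result = []
--     s = str(bin(k))[2:]  # убираем "0b" из числа
--     for i in range(N - len(s)):
--         if isDNF: result.append(-(1 + i))
--         else: result.append(1 + i)
--     for i in range(len(s), 0, -1):
--         if s[len(s) - i] == str(int(isDNF)):
--             result.append(N + 1 - i)
--         else:
--             result.append(-(N + 1 - i))
--     return result
-- ===== SOURCE B (Python) =====
-- def make_term(k, N, isDNF=True):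
--     # Arithmetic bit-peeling instead of string formatting: peel k's bits with
--     # divmod from the least significant end, emitting literals for positions
--     # N, N-1, ... and reversing at the end.  Exhausted bits (n == 0) yield the
--     # padding literals.  Negative k has no bit decomposition here.
--     if k < 0:
--         raise ValueError("k must be non-negative")
--     count = max(N, k.bit_length(), 1)
--     out = []
--     n, p = k, N
--     for _ in range(count):
--         n, b = divmod(n, 2)
--         out.append(p if b == int(isDNF) else -p)
--         p -= 1
--     out.reverse()
--     return out
-- ===== Notes on version B (the rewrite author's own statement) =====
-- stated objective: alternative
-- what changed: A formats k as a binary string and walks it with two loops (padding literals, then significant characters by a descending range with reverse indexing); B never builds a string: it peels k's bits arithmetically with divmod from the least significant end, emitting literals back-to-front and reversing once, with exhausted bits supplying the padding.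
-- outside the precondition, e.g. on make_term(-5, 4, True): A returns [-1, 2, -3, 4], B raises ValueError
import Mathlib
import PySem

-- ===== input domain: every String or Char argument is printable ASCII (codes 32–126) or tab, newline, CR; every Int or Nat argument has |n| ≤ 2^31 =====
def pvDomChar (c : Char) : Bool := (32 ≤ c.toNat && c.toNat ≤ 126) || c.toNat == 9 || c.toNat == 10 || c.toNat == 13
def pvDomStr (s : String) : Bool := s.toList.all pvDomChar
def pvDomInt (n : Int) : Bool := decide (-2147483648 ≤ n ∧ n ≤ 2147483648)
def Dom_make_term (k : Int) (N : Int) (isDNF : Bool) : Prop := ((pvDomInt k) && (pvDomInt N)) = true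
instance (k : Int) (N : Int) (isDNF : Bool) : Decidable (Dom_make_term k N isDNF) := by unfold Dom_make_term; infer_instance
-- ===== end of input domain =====

-- B never formats k as a binary string: it peels k's bits arithmetically with divmod,
-- emitting literals back-to-front and reversing once (objective: alternative algorithm).

-- ===== PORT A =====
def make_term (k : Int) (N : Int) (isDNF : Bool) : List Int :=
  -- s = str(bin(k))[2:]
  let s : List Char := PySem.List.slice (PySem.Int.toBinChars0b k) (some 2) none
  -- for i in range(N - len(s)): if isDNF: result.append(-(1+i)) else: result.append(1+i)
  let result := (PySem.List.pyRange 0 (N - (s.length : Int)) 1).foldl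
      (fun r i => if isDNF then r ++ [-(1 + i)] else r ++ [1 + i]) []
  -- for i in range(len(s), 0, -1): s[len(s)-i] is always in range, so the default is never used
  (PySem.List.pyRange (s.length : Int) 0 (-1)).foldl
      (fun r i =>
        if PySem.List.pyGetD s ((s.length : Int) - i) ' ' == (if isDNF then '1' else '0')
        then r ++ [N + 1 - i] else r ++ [-(N + 1 - i)]) result

-- ===== PORT B =====
def make_term_alt (k : Int) (N : Int) (isDNF : Bool) : List Int :=
  -- count = max(N, k.bit_length(), 1)
  let count : Int := max (max N ((PySem.Int.bitLength k : Int))) 1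
  -- n, p = k, N; for _ in range(count): n, b = divmod(n, 2); out.append(...); p -= 1
  let st := (PySem.List.pyRange 0 count 1).foldl
      (fun (st : Int × Int × List Int) _ =>
        (PySem.Int.floordiv st.1 2, st.2.1 - 1,
          st.2.2 ++ [if PySem.Int.mod st.1 2 == (if isDNF then 1 else 0) then st.2.1 else -st.2.1]))
      (k, N, ([] : List Int))
  -- out.reverse(); return out
  st.2.2.reverse

-- ===== PRECONDITION & SPEC =====
-- Pre_ excludes k < 0, where A's value is an artefact of slicing bin's '-0b' prefix (the stray
-- 'b' character is treated as a bit), and B's bit-peeling loop raises ValueError instead.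
def Pre_make_term (k : Int) (N : Int) (isDNF : Bool) : Prop := 0 ≤ k
instance (k : Int) (N : Int) (isDNF : Bool) : Decidable (Pre_make_term k N isDNF) := by unfold Pre_make_term; infer_instance
def pvWitness_make_term : Int × Int × Bool := (5, 3, true)

def Spec_make_term (k : Int) (N : Int) (isDNF : Bool) (out : List Int) : Prop := out = make_term_alt k N isDNF
instance (k : Int) (N : Int) (isDNF : Bool) (out : List Int) : Decidable (Spec_make_term k N isDNF out) := by unfold Spec_make_term; infer_instance

-- ===== CLAIM (what is proved, stated in full; the proofs are below) =====
def Claim_equal_make_term : Prop := ∀ (k : Int) (N : Int) (isDNF : Bool), Dom_make_term k N isDNF → Pre_make_term k N isDNF → Spec_make_term k N isDNF (make_term k N isDNF)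

-- ===== LEMMAS AND PROOFS =====

def pvBits (m : Nat) : List Char :=
  if h : m < 2 then [Nat.digitChar m]
  else pvBits (m / 2) ++ [Nat.digitChar (m % 2)]
decreasing_by exact Nat.div_lt_self (by omega) (by omega)

lemma pvBits_toDigitsCore : ∀ (f n : Nat) (l : List Char), n < 2 ^ f →
    Nat.toDigitsCore 2 (f + 1) n l = pvBits n ++ l := by
  intro f
  induction f with
  | zero =>
    intro n l h
    interval_cases n
    simp [Nat.toDigitsCore, pvBits]
  | succ f ih =>
    intro n l h
    rw [Nat.toDigitsCore]
    by_cases h2 : n / 2 = 0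
    · have hn : n < 2 := by omega
      rw [pvBits]
      simp [h2, hn, Nat.mod_eq_of_lt hn]
    · rw [if_neg h2, ih (n / 2) _ (by omega)]
      have h2' : ¬ n < 2 := by omega
      conv_rhs => rw [pvBits]
      simp [h2']
lemma pvBits_toDigits (n : Nat) : Nat.toDigits 2 n = pvBits n := by
  have h : n < 2 ^ n := Nat.lt_two_pow_self
  cases n with
  | zero => simp [Nat.toDigits, Nat.toDigitsCore, pvBits]
  | succ m => simpa using pvBits_toDigitsCore (m + 1) (m + 1) [] (by exact Nat.lt_two_pow_self)

lemma pvBits_length (m : Nat) : (pvBits m).length = max (PySem.Int.bitLength (m : Int)) 1 := by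
  induction m using Nat.strong_induction_on with
  | _ m ih =>
    rw [pvBits]
    by_cases h : m < 2
    · interval_cases m <;> rw [pvBits] <;> simp <;> decide
    · rw [dif_neg h]
      have h2 : 0 < m := by omega
      rw [PySem.Int.bitLength_natCast h2]
      have h3 : 0 < m / 2 := by omega
      have hpos : 1 ≤ PySem.Int.bitLength ((m / 2 : Nat) : Int) := by
        rw [PySem.Int.bitLength_natCast h3]; omega
      simp [ih (m / 2) (Nat.div_lt_self (by omega) (by omega))]
      rw [Int.natCast_div] at hpos
      push_cast at hpos ⊢
      omega

lemma pvTestBit_false (m t : Nat) (h : PySem.Int.bitLength (m : Int) ≤ t) :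
    m.testBit t = false := by
  have h1 := PySem.Int.lt_two_pow_bitLength (m : Int)
  simp only [Int.natAbs_natCast] at h1
  exact Nat.testBit_lt_two_pow (lt_of_lt_of_le h1 (Nat.pow_le_pow_right (by omega) h))

lemma pvBits_getD (m j : Nat) (h : j < (pvBits m).length) :
    (pvBits m).getD j ' ' = if m.testBit ((pvBits m).length - 1 - j) then '1' else '0' := by
  induction m using Nat.strong_induction_on generalizing j with
  | _ m ih =>
    rw [pvBits] at h ⊢
    by_cases hm : m < 2
    · rw [dif_pos hm] at h ⊢
      simp at h
      subst h
      interval_cases m <;> simp [Nat.testBit] <;> rfl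
    · rw [dif_neg hm] at h ⊢
      simp at h
      rcases Nat.lt_or_ge j (pvBits (m / 2)).length with hj | hj
      · rw [List.getD_append _ _ _ _ hj, ih (m / 2) (Nat.div_lt_self (by omega) (by omega)) j hj]
        have harith : (pvBits (m / 2)).length - 1 - j + 1
            = (pvBits (m / 2) ++ [(m % 2).digitChar]).length - 1 - j := by simp; omega
        rw [Nat.testBit_div_two, harith]
      · have hj2 : j = (pvBits (m / 2)).length := by omega
        subst hj2
        rw [List.getD_append_right _ _ _ _ hj]
        simp [Nat.testBit_zero]
        rcases Nat.mod_two_eq_zero_or_one m with h0 | h0 <;> simp [h0, Nat.digitChar]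

lemma pvA_key0 (s : List Char) (N : Int) (isDNF : Bool) :
    (PySem.List.pyRange (s.length : Int) 0 (-1)).foldl
      (fun r i =>
        if PySem.List.pyGetD s ((s.length : Int) - i) ' ' == (if isDNF then '1' else '0')
        then r ++ [N + 1 - i] else r ++ [-(N + 1 - i)])
      ((PySem.List.pyRange 0 (N - (s.length : Int)) 1).foldl
        (fun r i => if isDNF then r ++ [-(1 + i)] else r ++ [1 + i]) []) =
    (PySem.List.pyRange 0 (((PySem.List.pyRepeat ['0'] (N - (s.length : Int)) ++ s).length : Int)) 1).map
      (fun j => if PySem.List.pyGetD (PySem.List.pyRepeat ['0'] (N - (s.length : Int)) ++ s) j ' '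
                    == (if isDNF then '1' else '0')
                then (N - ((PySem.List.pyRepeat ['0'] (N - (s.length : Int)) ++ s).length : Int)) + 1 + j
                else -((N - ((PySem.List.pyRepeat ['0'] (N - (s.length : Int)) ++ s).length : Int)) + 1 + j)) := by
  rw [show (fun (r : List Int) (i : Int) => if isDNF then r ++ [-(1 + i)] else r ++ [1 + i])
        = fun (r : List Int) (i : Int) => r ++ [if isDNF then -(1 + i) else 1 + i] from
      funext fun r => funext fun i => (apply_ite (fun v => r ++ [v]) _ _ _).symm]
  rw [show (fun (r : List Int) (i : Int) =>
        if PySem.List.pyGetD s ((s.length : Int) - i) ' ' == (if isDNF then '1' else '0')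
        then r ++ [N + 1 - i] else r ++ [-(N + 1 - i)])
        = fun (r : List Int) (i : Int) => r ++ [if PySem.List.pyGetD s ((s.length : Int) - i) ' '
              == (if isDNF then '1' else '0') then N + 1 - i else -(N + 1 - i)] from
      funext fun r => funext fun i => (apply_ite (fun v => r ++ [v]) _ _ _).symm]
  rw [PySem.List.foldl_append_singleton_eq_map, PySem.List.foldl_append_singleton_eq_map,
      List.nil_append, PySem.List.pyRepeat_singleton, PySem.List.pyRange_one,
      PySem.List.pyRange_neg_one, PySem.List.pyRange_one]
  simp only [List.length_append, List.length_replicate, List.map_map, Int.sub_zero,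
      Int.toNat_natCast, zero_add]
  by_cases hN : N ≤ (s.length : Int)
  · -- no padding: (N - len).toNat = 0
    rw [show (N - (s.length : Int)).toNat = 0 from by omega]
    simp only [List.range_zero, List.map_nil, List.nil_append, List.replicate_zero,
      Nat.zero_add]
    apply List.map_congr_left
    intro t ht
    simp only [List.mem_range] at ht
    simp only [Function.comp_apply]
    rw [show (s.length : Int) - ((s.length : Int) - (t : Int)) = (t : Int) from by omega]
    simp only [PySem.List.pyGetD_natCast]
    split <;> split <;> omega
  · rw [List.range_add, List.map_append]
    congr 1
    · -- padding chunk
      apply List.map_congr_left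
      intro t ht
      simp only [List.mem_range] at ht
      simp only [Function.comp_apply, PySem.List.pyGetD_natCast]
      rw [List.getD_append _ _ _ _ (by simpa using ht)]
      cases isDNF <;>
        simp only [List.getD_eq_getElem?_getD, List.getElem?_replicate, ht,
          if_true, if_false, Option.getD_some,
          show (('0':Char) == '1') = false from rfl, show (('0':Char) == '0') = true from rfl,
          Bool.false_eq_true] <;>
        omega
    · -- significant-bit chunk
      rw [List.map_map]
      apply List.map_congr_left
      intro t ht
      simp only [List.mem_range] at ht
      simp only [Function.comp_apply, PySem.List.pyGetD_natCast]
      rw [show (s.length : Int) - ((s.length : Int) - (t : Int)) = (t : Int) from by omega,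
        List.getD_append_right _ _ _ _ (by simp)]
      simp only [PySem.List.pyGetD_natCast, List.length_replicate, Nat.add_sub_cancel_left]
      split <;> split <;> omega

lemma pvA_key (s : List Char) (N : Int) (isDNF : Bool) :
    (PySem.List.pyRange (s.length : Int) 0 (-1)).foldl
      (fun r i =>
        if PySem.List.pyGetD s ((s.length : Int) - i) ' ' == (if isDNF then '1' else '0')
        then r ++ [N + 1 - i] else r ++ [-(N + 1 - i)])
      ((PySem.List.pyRange 0 (N - (s.length : Int)) 1).foldl
        (fun r i => if isDNF then r ++ [-(1 + i)] else r ++ [1 + i]) []) =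
    (List.range ((N - (s.length : Int)).toNat + s.length)).map
      (fun j =>
        if (List.replicate (N - (s.length : Int)).toNat '0' ++ s).getD j ' ' == (if isDNF then '1' else '0')
        then N - (((N - (s.length : Int)).toNat + s.length : Nat) : Int) + 1 + (j : Int)
        else -(N - (((N - (s.length : Int)).toNat + s.length : Nat) : Int) + 1 + (j : Int))) := by
  rw [pvA_key0, PySem.List.pyRepeat_singleton, PySem.List.pyRange_one]
  simp only [List.length_append, List.length_replicate, Int.sub_zero, Int.toNat_natCast,
    List.map_map]
  apply List.map_congr_left
  intro t ht
  simp only [Function.comp_apply, zero_add, PySem.List.pyGetD_natCast]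

lemma pvReverse_map_range {α : Type} (f : Nat → α) (c : Nat) :
    ((List.range c).map f).reverse = (List.range c).map (fun j => f (c - 1 - j)) := by
  apply List.ext_getElem
  · simp
  · intro i h1 h2
    simp only [List.getElem_reverse, List.length_map, List.length_range, List.getElem_map,
      List.getElem_range]

lemma pvB_iter (isDNF : Bool) : ∀ (c : Nat) (n p : Int) (acc : List Int), 0 ≤ n →
    (((fun (st : Int × Int × List Int) =>
        (PySem.Int.floordiv st.1 2, st.2.1 - 1,
          st.2.2 ++ [if PySem.Int.mod st.1 2 == (if isDNF then 1 else 0) then st.2.1 else -st.2.1]))^[c])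
      (n, p, acc)).2.2
    = acc ++ (List.range c).map
        (fun t => if (n.toNat.testBit t) == isDNF then p - (t : Int) else -(p - (t : Int))) := by
  intro c
  induction c with
  | zero => intro n p acc hn; simp
  | succ c ih =>
    intro n p acc hn
    rw [Function.iterate_succ_apply]
    have hcast : n = ((n.toNat : Nat) : Int) := by omega
    have hdiv : PySem.Int.floordiv n 2 = ((n.toNat / 2 : Nat) : Int) := by
      rw [hcast, show (2 : Int) = ((2 : Nat) : Int) from rfl, PySem.Int.floordiv_natCast]; simp
    have hmod : PySem.Int.mod n 2 = ((n.toNat % 2 : Nat) : Int) := by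
      rw [hcast, show (2 : Int) = ((2 : Nat) : Int) from rfl, PySem.Int.mod_natCast]; simp
    simp only [hdiv, hmod]
    rw [ih _ _ _ (by positivity)]
    rw [List.range_succ_eq_map, List.map_cons, List.map_map, Int.toNat_natCast]
    simp only [List.append_assoc, List.singleton_append]
    congr 1
    congr 1
    · -- head element
      rcases Nat.mod_two_eq_zero_or_one n.toNat with h0 | h0 <;>
        cases isDNF <;>
          simp [h0, Nat.testBit_zero]
    · -- tail: shift the bit index
      apply List.map_congr_left
      intro t ht
      simp only [Function.comp_apply, Nat.succ_eq_add_one]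
      rw [Nat.testBit_div_two]
      push_cast
      split <;> ring

lemma pvFoldl_ignore {alpha beta : Type} (F : alpha -> alpha) : forall (l : List beta) (init : alpha),
    l.foldl (fun s _ => F s) init = F^[l.length] init := by
  intro l
  induction l with
  | nil => intro init; rfl
  | cons x xs ih => intro init; simp [List.foldl_cons, ih, Function.iterate_succ_apply]

lemma pvMain (k N : Int) (isDNF : Bool) (hk : 0 ≤ k) : make_term k N isDNF = make_term_alt k N isDNF := by
  have hcast : k = ((k.toNat : Nat) : Int) := by omega
  -- the binary digit string
  have hs : PySem.List.slice (PySem.Int.toBinChars0b k) (some 2) none = pvBits k.toNat := by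
    rw [PySem.Int.toBinChars0b, if_neg (by omega),
      show (2 : Int) = ((2 : Nat) : Int) from rfl, PySem.List.slice_from_natCast]
    simp [pvBits_toDigits]
  set m : Nat := k.toNat with hm
  set bl : Nat := PySem.Int.bitLength k with hbl
  have hblm : PySem.Int.bitLength ((m : Nat) : Int) = bl := by rw [hbl, ← hcast]
  have hlen : (pvBits m).length = max bl 1 := by rw [pvBits_length, hblm]
  set lenS : Nat := (pvBits m).length with hlenS
  set pad : Nat := (N - (lenS : Int)).toNat with hpad
  set P : Nat := pad + lenS with hP
  set C : Nat := (max (max N ((bl : Nat) : Int)) 1).toNat with hC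
  have hPC : P = C := by rw [hP, hC, hpad]; omega
  -- A as a map
  have hA : make_term k N isDNF =
      (List.range P).map (fun j =>
        if (List.replicate pad '0' ++ pvBits m).getD j ' ' == (if isDNF then '1' else '0')
        then N - ((P : Nat) : Int) + 1 + (j : Int)
        else -(N - ((P : Nat) : Int) + 1 + (j : Int))) := by
    show _ = _
    unfold make_term
    rw [hs]
    exact pvA_key (pvBits m) N isDNF
  -- B as a reversed map
  have hcount : ((max (max N ((bl : Nat) : Int)) 1) - 0).toNat = C := by rw [hC]; omega
  have hB : make_term_alt k N isDNF =
      (List.range C).map (fun j =>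
        if (m.testBit (C - 1 - j)) == isDNF then N - ((C - 1 - j : Nat) : Int)
        else -(N - ((C - 1 - j : Nat) : Int))) := by
    unfold make_term_alt
    dsimp only
    rw [pvFoldl_ignore, PySem.List.length_pyRange_one, hcount,
      pvB_iter isDNF C k N [] hk, List.nil_append, pvReverse_map_range]
  rw [hA, hB, ← hPC]
  apply List.map_congr_left
  intro j hj
  simp only [List.mem_range] at hj
  have hchar : (List.replicate pad '0' ++ pvBits m).getD j ' '
      = if m.testBit (P - 1 - j) then '1' else '0' := by
    rcases Nat.lt_or_ge j pad with hjp | hjp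
    · rw [List.getD_append _ _ _ _ (by simpa using hjp)]
      have hbit : m.testBit (P - 1 - j) = false := by
        apply pvTestBit_false
        rw [hblm]
        omega
      simp [hbit, List.getD_eq_getElem?_getD, hjp]
    · rw [List.getD_append_right _ _ _ _ (by simpa using hjp)]
      have hjl : j - pad < lenS := by omega
      rw [List.length_replicate]
      have hidx : lenS - 1 - (j - pad) = P - 1 - j := by omega
      rw [pvBits_getD m (j - pad) (by rw [← hlenS]; omega), ← hlenS, hidx]
  rw [hchar]
  cases hbit : m.testBit (P - 1 - j) <;> cases isDNF <;> simp <;> omega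

-- ===== VERDICT (by name: the statement is the Claim_ definition above) =====
theorem make_term_spec : Claim_equal_make_term := by
  intro k N isDNF _ hk
  unfold Spec_make_term
  exact pvMain k N isDNF hk
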